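-- pv_equiv track=rewrite | github.com/yofn/pyacm | codeforces/math数学/1200/1143B最大位数积.py | f
-- ===== SOURCE A (Python) =====
-- def f(n):
--     l = []
--     while n>0:
--         l.append(n%10)
--         n = n//10
--     l.reverse()
--     ll = len(l)
--     p1 = 1  #original digits
--     pl = []
--     for i in range(ll):
--         p2  = l[i] if i==ll-1 else max(l[i]-1,1)*9**(ll-i-1)
--         pl.append(p1*p2)
--         p1 *= l[i]
--     return max(pl)
-- ===== SOURCE B (Python) =====
-- def _pc(m):
--     # returns (digit product of m, best product obtainable from m's digits when one
--     # digit is decremented (floored at 1) and every lower digit is replaced by 9)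
--     if m < 10:
--         return (m, max(m - 1, 1))
--     p, c = _pc(m // 10)
--     d = m % 10
--     return (p * d, max(9 * c, p * max(d - 1, 1)))
--
-- def f(n):
--     if n < 10:
--         return n
--     p, c = _pc(n // 10)
--     return max(9 * c, p * (n % 10))
-- ===== Notes on version B (the rewrite author's own statement) =====
-- stated objective: simpler
-- what changed: Replaces A's digit-list building, reversal and indexed loop with per-position 9-powers by a single top-down recursion on n//10 that carries only the pair (digit product so far, best candidate so far), multiplying previous candidates by 9 as each new digit arrives.
import Mathlib
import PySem

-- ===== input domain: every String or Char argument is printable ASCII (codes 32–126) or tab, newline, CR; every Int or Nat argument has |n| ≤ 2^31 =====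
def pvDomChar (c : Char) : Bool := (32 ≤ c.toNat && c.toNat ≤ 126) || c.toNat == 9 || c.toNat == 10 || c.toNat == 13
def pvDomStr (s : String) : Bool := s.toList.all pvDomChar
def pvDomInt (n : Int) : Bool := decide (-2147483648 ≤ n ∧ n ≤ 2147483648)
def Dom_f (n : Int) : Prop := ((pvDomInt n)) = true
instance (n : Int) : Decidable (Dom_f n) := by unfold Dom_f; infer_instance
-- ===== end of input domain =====

-- B replaces A's digit list + indexed loop by one recursion carrying (digit product, best); return values proved equal for n ≥ 1.

-- ===== PORT A =====
-- the 'while n>0' loop collecting n%10 and flooring n//10, as structural recursion on the same state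
def lowDigits (n : Int) : List Int :=
  if _h : 0 < n then PySem.Int.mod n 10 :: lowDigits (PySem.Int.floordiv n 10) else []
termination_by n.toNat
decreasing_by
  rw [PySem.Int.floordiv_eq_ediv_of_pos (by norm_num : (0:Int) < 10)]; omega

def f (n : Int) : Int :=
  let l := (lowDigits n).reverse          -- l.reverse()
  let ll : Int := l.length
  -- 'for i in range(ll)' with accesses l[i] ported as a fold over enumerate l (same (i, l[i]) pairs);
  -- 9**(ll-i-1) ported as 9 ^ (ll-i-1).toNat (the exponent is nonnegative since i < ll)
  let st := (PySem.List.enumerate l 0).foldl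
    (fun (st : Int × List Int) (p : Int × Int) =>
      let p2 := if p.1 == ll - 1 then p.2 else (max (p.2 - 1) 1) * 9 ^ ((ll - p.1 - 1).toNat)
      (st.1 * p.2, st.2 ++ [st.1 * p2])) (1, [])
  (PySem.List.max? st.2 (fun y => y)).getD 0   -- max(pl); the getD is unreachable under Pre_f

-- ===== PORT B =====
def pcRec (m : Int) : Int × Int :=
  if h : m < 10 then (m, max (m - 1) 1)
  else
    let pc := pcRec (PySem.Int.floordiv m 10)
    let d := PySem.Int.mod m 10
    (pc.1 * d, max (9 * pc.2) (pc.1 * max (d - 1) 1))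
termination_by m.toNat
decreasing_by
  rw [PySem.Int.floordiv_eq_ediv_of_pos (by norm_num : (0:Int) < 10)]; omega

def f_alt (n : Int) : Int :=
  if n < 10 then n
  else
    let pc := pcRec (PySem.Int.floordiv n 10)
    max (9 * pc.2) (pc.1 * PySem.Int.mod n 10)

-- ===== PRECONDITION & SPEC =====
-- Pre_f excludes exactly n ≤ 0, where A's digit list is empty and max([]) raises ValueError.
def Pre_f (n : Int) : Prop := 1 ≤ n
instance (n : Int) : Decidable (Pre_f n) := by unfold Pre_f; infer_instance
def pvWitness_f : Int := 219

def Spec_f (n : Int) (out : Int) : Prop := out = f_alt n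
instance (n : Int) (out : Int) : Decidable (Spec_f n out) := by unfold Spec_f; infer_instance

-- ===== CLAIM (what is proved, stated in full; the proofs are below) =====
def Claim_equal_f : Prop := ∀ (n : Int), Dom_f n → Pre_f n → Spec_f n (f n)

-- ===== LEMMAS AND PROOFS =====

-- arithmetic bridges for the base-10 primitives
theorem fd10 (n : Int) : PySem.Int.floordiv n 10 = n / 10 :=
  PySem.Int.floordiv_eq_ediv_of_pos (by norm_num)

theorem md10 (n : Int) : PySem.Int.mod n 10 = n % 10 :=
  PySem.Int.mod_eq_emod_of_pos (by norm_num)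

theorem lowDigits_pos {n : Int} (h : 0 < n) :
    lowDigits n = PySem.Int.mod n 10 :: lowDigits (PySem.Int.floordiv n 10) := by
  rw [lowDigits]; simp [h]

theorem lowDigits_nonpos {n : Int} (h : ¬ 0 < n) : lowDigits n = [] := by
  rw [lowDigits]; simp [h]

theorem lowDigits_small {n : Int} (h1 : 1 ≤ n) (h2 : n < 10) : lowDigits n = [n] := by
  rw [lowDigits_pos (by omega), lowDigits_nonpos, md10]
  · congr 1; omega
  · rw [fd10]; omega

theorem lowDigits_rev_cons {n : Int} (h : 1 ≤ n) :
    ∃ a M, (lowDigits n).reverse = a :: M := by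
  rcases hrev : (lowDigits n).reverse with _ | ⟨a, M⟩
  · rw [lowDigits_pos (by omega : (0:Int) < n)] at hrev; simp at hrev
  · exact ⟨a, M, rfl⟩

-- the uniform candidate list: every digit decremented (floored at 1) and padded with 9s
def plU : List Int → Int → List Int
  | [], _ => []
  | a :: T, p1 => (p1 * (max (a - 1) 1) * 9 ^ T.length) :: plU T (p1 * a)

-- A's candidate list pl as a pure list function (last digit kept as-is)
def plQ : List Int → Int → List Int
  | [], _ => []
  | a :: T, p1 => (p1 * (if T.isEmpty then a else (max (a - 1) 1) * 9 ^ T.length)) :: plQ T (p1 * a)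

-- A's loop body over enumerated indexed digits
def plP (ll : Int) : Int → Int → List Int → List Int
  | _, _, [] => []
  | k, p1, a :: T =>
      (p1 * (if k == ll - 1 then a else (max (a - 1) 1) * 9 ^ ((ll - k - 1).toNat))) :: plP ll (k + 1) (p1 * a) T

theorem plU_ne_nil (a : Int) (M : List Int) (p1 : Int) : plU (a :: M) p1 ≠ [] := by
  simp [plU]

theorem loop_eq (ll : Int) : ∀ (T : List Int) (k p1 : Int) (pl : List Int),
    (PySem.List.enumerate T k).foldl
      (fun (st : Int × List Int) (p : Int × Int) =>
        let p2 := if p.1 == ll - 1 then p.2 else (max (p.2 - 1) 1) * 9 ^ ((ll - p.1 - 1).toNat)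
        (st.1 * p.2, st.2 ++ [st.1 * p2])) (p1, pl)
      = (T.foldl (· * ·) p1, pl ++ plP ll k p1 T) := by
  intro T
  induction T with
  | nil => intro k p1 pl; simp [PySem.List.enumerate_nil, plP]
  | cons a T ih =>
      intro k p1 pl
      rw [PySem.List.enumerate_cons, List.foldl_cons, ih]
      simp [plP]

theorem plP_eq_plQ (ll : Int) : ∀ (T : List Int) (k p1 : Int), k + T.length = ll →
    plP ll k p1 T = plQ T p1 := by
  intro T
  induction T with
  | nil => intro k p1 _; rfl
  | cons a T ih =>
      intro k p1 hk
      simp only [List.length_cons] at hk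
      have h1 : (k == ll - 1) = T.isEmpty := by
        rcases T with _ | ⟨b, T⟩
        · simp only [List.isEmpty_nil, beq_iff_eq]
          simp only [List.length_nil] at hk; omega
        · simp only [List.isEmpty_cons]
          simp only [List.length_cons] at hk
          simp only [beq_eq_false_iff_ne]; omega
      have h2 : (ll - k - 1).toNat = T.length := by omega
      simp only [plP, plQ, h1, h2, ih (k + 1) (p1 * a) (by omega)]

-- append lemmas: accounting for a further (last) digit d multiplies every earlier candidate by 9
theorem plQ_append (d : Int) : ∀ (M : List Int) (p1 : Int),
    plQ (M ++ [d]) p1 = (plU M p1).map (fun x => 9 * x) ++ [(M.foldl (· * ·) p1) * d] := by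
  intro M
  induction M with
  | nil => intro p1; simp [plQ, plU]
  | cons a M ih =>
      intro p1
      simp only [List.cons_append, plQ, plU, List.map_cons, List.length_append, List.length_cons,
        List.length_nil, List.foldl_cons, ih]
      congr 1
      rw [show (M ++ [d]).isEmpty = false from by simp]
      simp only [if_false, Bool.false_eq_true]
      rw [pow_succ]; ring

theorem plU_append (d : Int) : ∀ (M : List Int) (p1 : Int),
    plU (M ++ [d]) p1 = (plU M p1).map (fun x => 9 * x) ++ [(M.foldl (· * ·) p1) * max (d - 1) 1] := by
  intro M
  induction M with
  | nil => intro p1; simp [plU]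
  | cons a M ih =>
      intro p1
      simp only [List.cons_append, plU, List.map_cons, List.length_append, List.length_cons,
        List.length_nil, List.foldl_cons, ih]
      congr 1
      rw [pow_succ]; ring

-- max(pl) as a value
def mx (xs : List Int) : Int := (PySem.List.max? xs (fun y => y)).getD 0

theorem mx_cons (x : Int) (t : List Int) : mx (x :: t) = t.foldl max x := by
  simp [mx, PySem.List.max?_id_cons]

theorem mx_append_singleton (x y : Int) (t : List Int) :
    mx ((x :: t) ++ [y]) = max (mx (x :: t)) y := by
  simp [mx_cons, List.foldl_append]

theorem foldl_max_map9 : ∀ (t : List Int) (a : Int),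
    (t.map (fun x => 9 * x)).foldl max (9 * a) = 9 * t.foldl max a := by
  intro t
  induction t with
  | nil => intro a; simp
  | cons b t ih =>
      intro a
      simp only [List.map_cons, List.foldl_cons]
      rw [show max (9 * a) (9 * b) = 9 * max a b by omega, ih]

theorem mx_map9_append (x y : Int) (t : List Int) :
    mx ((x :: t).map (fun z => 9 * z) ++ [y]) = max (9 * mx (x :: t)) y := by
  rw [List.map_cons, mx_append_singleton, mx_cons, mx_cons, foldl_max_map9]

-- f n computed on the digit list
theorem f_eq_mx_plQ (n : Int) : f n = mx (plQ ((lowDigits n).reverse) 1) := by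
  show ((PySem.List.max? _ _).getD 0) = _
  rw [loop_eq ((lowDigits n).reverse : List Int).length ((lowDigits n).reverse) 0 1 [],
    plP_eq_plQ _ _ 0 1 (by simp)]
  rfl

-- B's invariant: pcRec m = (digit product of m, max of the uniform candidate list)
theorem pcRec_spec : ∀ (N : Nat) (m : Int), m.toNat ≤ N → 1 ≤ m →
    pcRec m = (((lowDigits m).reverse).foldl (· * ·) 1, mx (plU ((lowDigits m).reverse) 1)) := by
  intro N
  induction N with
  | zero => intro m hN hm; omega
  | succ N ih =>
      intro m hN hm
      by_cases hsm : m < 10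
      · rw [pcRec, lowDigits_small hm hsm]
        simp [hsm, plU, mx_cons]
      · have hq : 1 ≤ PySem.Int.floordiv m 10 := by rw [fd10]; omega
        have hqN : (PySem.Int.floordiv m 10).toNat ≤ N := by rw [fd10]; omega
        rw [pcRec, dif_neg hsm, ih _ hqN hq, lowDigits_pos (show (0:Int) < m by omega)]
        simp only [List.reverse_cons]
        obtain ⟨a, M, hM⟩ := lowDigits_rev_cons hq
        rw [hM, plU_append]
        rcases hP : plU (a :: M) 1 with _ | ⟨x, t⟩
        · exact absurd hP (plU_ne_nil a M 1)
        · rw [mx_map9_append]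
          simp [List.foldl_append]

theorem main_eq {n : Int} (h : 1 ≤ n) : f n = f_alt n := by
  by_cases hs : n < 10
  · rw [f_eq_mx_plQ, lowDigits_small h hs]
    simp [f_alt, hs, plQ, mx_cons]
  · rw [f_eq_mx_plQ, lowDigits_pos (show (0:Int) < n by omega)]
    simp only [List.reverse_cons]
    have hq : 1 ≤ PySem.Int.floordiv n 10 := by rw [fd10]; omega
    obtain ⟨a, M, hM⟩ := lowDigits_rev_cons hq
    rw [hM, plQ_append]
    rcases hP : plU (a :: M) 1 with _ | ⟨x, t⟩
    · exact absurd hP (plU_ne_nil a M 1)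
    · rw [mx_map9_append]
      unfold f_alt
      rw [if_neg hs, pcRec_spec (PySem.Int.floordiv n 10).toNat _ le_rfl hq, hM, hP]

-- ===== VERDICT (by name: the statement is the Claim_ definition above) =====
theorem f_spec : Claim_equal_f := by
  intro n _ hpre
  unfold Spec_f
  exact main_eq hpre
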